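-- pv_equiv track=rewrite | github.com/bbrucee/ECE573_HW2 | Q1/Q1.py | shell3
-- ===== SOURCE A (Python) =====
-- def shell3(input_array):
--     comparisons = 0
--     for i in range(3, len(input_array)):
--         key = input_array[i]
--         j = i
--         while j >= 3 and input_array[j - 3] > key:
--             comparisons += 1
--             input_array[j] = input_array[j - 3]
--             j -= 3
--         comparisons += 1
--         input_array[j] = key
--     return comparisons
-- ===== SOURCE B (Python) =====
-- def shell3(input_array):
--     # Pure inversion counting: the comparisons a gap-3 insertion sort makes are
--     # one per element from index 3 on, plus one per stride-3 inversion.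
--     # (Unlike A, this does not mutate input_array; return value is identical.)
--     total = 0
--     for i in range(3, len(input_array)):
--         total += 1
--         for k in range(i % 3, i, 3):
--             if input_array[k] > input_array[i]:
--                 total += 1
--     return total
-- ===== Notes on version B (the rewrite author's own statement) =====
-- stated objective: alternative
-- what changed: B replaces the mutating gap-3 insertion-sort simulation by pure counting: for each index i >= 3 it counts 1 plus the stride-3 predecessors greater than input_array[i] (comparisons of an insertion sort equal n-3 plus the inversions of each stride-3 subsequence); B performs no shifting and does not mutate the input.
import Mathlib
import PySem

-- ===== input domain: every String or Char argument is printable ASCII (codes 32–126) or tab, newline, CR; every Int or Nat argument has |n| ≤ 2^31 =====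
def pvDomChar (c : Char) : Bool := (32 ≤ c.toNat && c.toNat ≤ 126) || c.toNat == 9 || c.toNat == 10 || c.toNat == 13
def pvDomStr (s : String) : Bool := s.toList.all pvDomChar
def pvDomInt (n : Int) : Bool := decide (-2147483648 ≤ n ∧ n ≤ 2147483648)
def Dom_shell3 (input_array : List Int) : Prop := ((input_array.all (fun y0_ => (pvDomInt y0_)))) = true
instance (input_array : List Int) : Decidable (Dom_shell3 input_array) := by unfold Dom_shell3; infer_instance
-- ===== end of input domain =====

-- B counts each element's greater stride-3 predecessors instead of simulating the
-- shifting insertion sort; return values are equal (A additionally sorts the caller's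
-- list in place — the equivalence proved here is about the return value only).

-- ===== PORT A =====
-- inner while loop: 'while j >= 3 and input_array[j-3] > key: …'
-- (j stays ≥ 0 throughout, so 'j.toNat' as the set index is exact)
def innerA (arr : List Int) (key : Int) (j : Int) (c : Int) : List Int × Int × Int :=
  if h : 3 ≤ j ∧ key < PySem.List.pyGetD arr (j - 3) 0 then
    innerA (arr.set j.toNat (PySem.List.pyGetD arr (j - 3) 0)) key (j - 3) (c + 1)
  else (arr, j, c)
termination_by j.toNat
decreasing_by omega

def shell3 (input_array : List Int) : Int :=
  ((PySem.List.pyRange 3 (PySem.List.len input_array) 1).foldl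
    (fun (st : List Int × Int) i =>
      let key := PySem.List.pyGetD st.1 i 0
      let r := innerA st.1 key i st.2
      (r.1.set r.2.1.toNat key, r.2.2 + 1))
    (input_array, 0)).2

-- ===== PORT B =====
def shell3_alt (input_array : List Int) : Int :=
  (PySem.List.pyRange 3 (PySem.List.len input_array) 1).foldl
    (fun total i =>
      (PySem.List.pyRange (PySem.Int.mod i 3) i 3).foldl
        (fun t k =>
          if PySem.List.pyGetD input_array i 0 < PySem.List.pyGetD input_array k 0 then t + 1
          else t)
        (total + 1))
    0

-- ===== PRECONDITION & SPEC =====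
def Spec_shell3 (input_array : List Int) (out : Int) : Prop := out = shell3_alt input_array
instance (input_array : List Int) (out : Int) : Decidable (Spec_shell3 input_array out) := by unfold Spec_shell3; infer_instance

-- ===== CLAIM (what is proved, stated in full; the proofs are below) =====
def Claim_equal_shell3 : Prop := ∀ (input_array : List Int), Dom_shell3 input_array → Spec_shell3 input_array (shell3 input_array)

-- ===== LEMMAS AND PROOFS =====

-- first q elements of the stride-3 class with offset r
def clsL (a : List Int) (r q : Nat) : List Int :=
  (List.range q).map (fun k => a.getD (r + 3 * k) 0)

-- ordered insert matching the inner loop's stopping rule (insert after equal keys)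
def insS (key : Int) : List Int → List Int
  | [] => [key]
  | x :: xs => if key < x then key :: x :: xs else x :: insS key xs

-- stride-3 inversions charged to index i
def SaN (a : List Int) (i : Nat) : Nat :=
  (clsL a (i % 3) (i / 3)).countP (fun x => decide (a.getD i 0 < x))

-- comparison count after processing indices 3..i-1
def CntF (a : List Int) : Nat → Int
  | 0 => 0
  | i + 1 => if 3 ≤ i then CntF a i + 1 + (SaN a i : Int) else 0

lemma clsL_succ (a : List Int) (r q : Nat) :
    clsL a r (q + 1) = clsL a r q ++ [a.getD (r + 3 * q) 0] := by
  simp [clsL, List.range_succ]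

lemma clsL_congr {a b : List Int} {r q : Nat}
    (h : ∀ k, k < q → a.getD (r + 3 * k) 0 = b.getD (r + 3 * k) 0) :
    clsL a r q = clsL b r q := by
  unfold clsL
  exact List.map_congr_left (fun k hk => h k (List.mem_range.mp hk))

lemma getD_set_self (l : List Int) (n : Nat) (v d : Int) (h : n < l.length) :
    (l.set n v).getD n d = v := by
  simp [List.getD, h]

lemma getD_set_ne (l : List Int) (m n : Nat) (v d : Int) (h : m ≠ n) :
    (l.set m v).getD n d = l.getD n d := by
  simp [List.getD, List.getElem?_set_ne h]

lemma insS_append_gt (key x : Int) (l : List Int) (h : key < x) :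
    insS key (l ++ [x]) = insS key l ++ [x] := by
  induction l with
  | nil => simp [insS, h]
  | cons y ys ih =>
      by_cases hy : key < y <;> simp [insS, hy, ih]

lemma insS_all_le (key : Int) (l : List Int) (h : ∀ y ∈ l, y ≤ key) :
    insS key l = l ++ [key] := by
  induction l with
  | nil => simp [insS]
  | cons y ys ih =>
      have hy : ¬ key < y := not_lt.mpr (h y (by simp))
      simp [insS, hy, ih (fun z hz => h z (by simp [hz]))]

lemma insS_perm (key : Int) (l : List Int) : (insS key l).Perm (key :: l) := by
  induction l with
  | nil => simp [insS]
  | cons y ys ih =>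
      by_cases hy : key < y
      · simp [insS, hy]
      · simpa [insS, hy] using ((ih.cons y).trans (List.Perm.swap key y ys))

lemma insS_sorted (key : Int) (l : List Int) (h : l.Pairwise (· ≤ ·)) :
    (insS key l).Pairwise (· ≤ ·) := by
  induction l with
  | nil => simp [insS]
  | cons y ys ih =>
      rcases List.pairwise_cons.mp h with ⟨hy, hys⟩
      by_cases hk : key < y
      · simp only [insS, if_pos hk]
        refine List.pairwise_cons.mpr ⟨?_, h⟩
        intro b hb
        rcases List.mem_cons.mp hb with rfl | hb
        · exact le_of_lt hk
        · exact (le_of_lt hk).trans (hy b hb)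
      · simp only [insS, if_neg hk]
        refine List.pairwise_cons.mpr ⟨?_, ih hys⟩
        intro b hb
        rcases List.mem_cons.mp ((insS_perm key ys).mem_iff.mp hb) with rfl | hb
        · exact not_lt.mp hk
        · exact hy b hb

lemma inner_spec (key : Int) (r : Nat) (hr : r < 3) :
    ∀ (q : Nat) (a : List Int) (c : Int), r + 3 * q < a.length →
      (clsL a r q).Pairwise (· ≤ ·) →
      ∃ A2 t, t ≤ q ∧
        innerA a key ((r + 3 * q : Nat) : Int) c
          = (A2, ((r + 3 * t : Nat) : Int),
             c + ((clsL a r q).countP (fun x => decide (key < x)) : Int)) ∧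
        (A2.set (r + 3 * t) key).length = a.length ∧
        clsL (A2.set (r + 3 * t) key) r (q + 1) = insS key (clsL a r q) ∧
        (∀ p : Nat, (∀ k : Nat, k ≤ q → p ≠ r + 3 * k) →
          (A2.set (r + 3 * t) key).getD p 0 = a.getD p 0) := by
  intro q
  induction q with
  | zero =>
      intro a c hlen _
      refine ⟨a, 0, le_refl 0, ?_, ?_, ?_, ?_⟩
      · rw [innerA, dif_neg]
        · simp [clsL]
        · rintro ⟨h3, -⟩
          omega
      · simp
      · rw [clsL_succ, getD_set_self _ _ _ _ (by omega)]
        simp [clsL, insS]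
      · intro p hp
        exact getD_set_ne _ _ _ _ _ (by have := hp 0 (le_refl 0); omega)
  | succ q ih =>
      intro a c hlen hs
      have hsplit : clsL a r (q + 1) = clsL a r q ++ [a.getD (r + 3 * q) 0] := clsL_succ a r q
      have hpe : (clsL a r q).Pairwise (· ≤ ·) := by
        have := hs
        rw [hsplit] at this
        exact (List.pairwise_append.mp this).1
      have hyx : ∀ y ∈ clsL a r q, y ≤ a.getD (r + 3 * q) 0 := by
        have := hs
        rw [hsplit] at this
        intro y hy
        exact (List.pairwise_append.mp this).2.2 y hy _ (by simp)
      have hidx : ((r + 3 * (q + 1) : Nat) : Int) - 3 = ((r + 3 * q : Nat) : Int) := by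
        push_cast; ring
      have hx : PySem.List.pyGetD a ((r + 3 * q : Nat) : Int) 0 = a.getD (r + 3 * q) 0 :=
        PySem.List.pyGetD_natCast a (r + 3 * q) 0
      by_cases hkx : key < a.getD (r + 3 * q) 0
      · -- the while-loop shifts a[r+3q] up and recurses
        have hstep :
            innerA a key ((r + 3 * (q + 1) : Nat) : Int) c
              = innerA (a.set (r + 3 * (q + 1)) (a.getD (r + 3 * q) 0)) key
                  ((r + 3 * q : Nat) : Int) (c + 1) := by
          rw [innerA, hidx, hx, dif_pos ⟨by omega, hkx⟩, Int.toNat_natCast]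
        set a' := a.set (r + 3 * (q + 1)) (a.getD (r + 3 * q) 0) with ha'
        have hcls' : clsL a' r q = clsL a r q := by
          refine clsL_congr ?_
          intro k hk
          exact getD_set_ne _ _ _ _ _ (by omega)
        obtain ⟨A2, t, ht, hres, hlen3, hcls3, hunch⟩ :=
          ih a' (c + 1) (by simp [ha', List.length_set]; omega) (by rw [hcls']; exact hpe)
        refine ⟨A2, t, by omega, ?_, ?_, ?_, ?_⟩
        · rw [hstep, hres, hcls']
          have hcount : (clsL a r (q + 1)).countP (fun x => decide (key < x))
              = (clsL a r q).countP (fun x => decide (key < x)) + 1 := by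
            rw [hsplit, List.countP_append]
            simp [show key < a[r + 3 * q]?.getD 0 from hkx]
          rw [hcount]
          push_cast
          ring_nf
        · rw [hlen3, ha', List.length_set]
        · have htop : (A2.set (r + 3 * t) key).getD (r + 3 * (q + 1)) 0
              = a.getD (r + 3 * q) 0 := by
            rw [hunch _ (by intro k hk; omega), ha',
              getD_set_self _ _ _ _ (by omega)]
          rw [clsL_succ, hcls3, hcls', hsplit, htop,
            insS_append_gt _ _ _ hkx]
        · intro p hp
          rw [hunch p (fun k hk => hp k (by omega)), ha',
            getD_set_ne _ _ _ _ _ (by have := hp (q + 1) (le_refl _); omega)]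
      · -- the while-loop stops immediately: everything in the class prefix is ≤ key
        have hall : ∀ y ∈ clsL a r (q + 1), y ≤ key := by
          intro y hy
          rw [hsplit] at hy
          rcases List.mem_append.mp hy with hy | hy
          · exact (hyx y hy).trans (not_lt.mp hkx)
          · simp at hy
            subst hy
            exact not_lt.mp hkx
        refine ⟨a, q + 1, le_refl _, ?_, by simp, ?_, ?_⟩
        · rw [innerA, dif_neg]
          · have : (clsL a r (q + 1)).countP (fun x => decide (key < x)) = 0 := by
              refine List.countP_eq_zero.mpr ?_
              intro y hy
              simpa using not_lt.mpr (hall y hy)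
            rw [this]
            simp
          · rintro ⟨-, hlt⟩
            rw [hidx, hx] at hlt
            exact hkx hlt
        · rw [clsL_succ, insS_all_le _ _ hall]
          congr 1
          · refine clsL_congr ?_
            intro k hk
            exact getD_set_ne _ _ _ _ _ (by omega)
          · rw [getD_set_self _ _ _ _ (by omega)]
        · intro p hp
          exact getD_set_ne _ _ _ _ _ (by have := hp (q + 1) (le_refl _); omega)

-- the step function of shell3's outer fold
def stepA : List Int × Int → Int → List Int × Int :=
  fun st i =>
    let key := PySem.List.pyGetD st.1 i 0
    let r := innerA st.1 key i st.2
    (r.1.set r.2.1.toNat key, r.2.2 + 1)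

def cntr (r i : Nat) : Nat := (i + 2 - r) / 3

lemma outer_loop (a : List Int) :
    ∀ (fuel i : Nat) (arr : List Int) (c : Int),
      3 ≤ i → i + fuel = a.length →
      arr.length = a.length →
      (∀ p : Nat, i ≤ p → arr.getD p 0 = a.getD p 0) →
      (∀ r : Nat, r < 3 →
        (clsL arr r (cntr r i)).Pairwise (· ≤ ·) ∧
        (clsL arr r (cntr r i)).Perm (clsL a r (cntr r i))) →
      ((PySem.List.pyRange (i : Int) (a.length : Int) 1).foldl stepA (arr, c)).2
        = c + (CntF a a.length - CntF a i) := by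
  intro fuel
  induction fuel with
  | zero =>
      intro i arr c h3 hfe hlen hun hcls
      rw [PySem.List.pyRange_one_eq_nil (by omega)]
      have hia : i = a.length := by omega
      simp [hia]
  | succ f ihf =>
      intro i arr c h3 hfe hlen hun hcls
      obtain ⟨r, q, hr3, rfl⟩ : ∃ r q, r < 3 ∧ i = r + 3 * q :=
        ⟨i % 3, i / 3, by omega, by omega⟩
      rw [PySem.List.pyRange_one_cons (by omega), List.foldl_cons]
      obtain ⟨hsort, hperm⟩ := hcls r hr3
      rw [show cntr r (r + 3 * q) = q from by unfold cntr; omega] at hsort hperm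
      obtain ⟨A2, t, ht, hres, hlen3, hcls3, hunch⟩ :=
        inner_spec (arr.getD (r + 3 * q) 0) r hr3 q arr c (by omega) hsort
      set key := arr.getD (r + 3 * q) 0 with hkeydef
      set cnt := (clsL arr r q).countP (fun x => decide (key < x)) with hcnt
      have hstep : stepA (arr, c) ((r + 3 * q : Nat) : Int)
          = (A2.set (r + 3 * t) key, c + (cnt : Int) + 1) := by
        simp only [stepA]
        rw [show PySem.List.pyGetD arr ((r + 3 * q : Nat) : Int) 0 = key from
              PySem.List.pyGetD_natCast arr _ 0,
          hres]
        simp only [Int.toNat_natCast]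
      rw [hstep]
      set arr' := A2.set (r + 3 * t) key with harr'
      have hk2 : key = a.getD (r + 3 * q) 0 := hun _ (le_refl _)
      have hunch' : ∀ p : Nat, r + 3 * q + 1 ≤ p → arr'.getD p 0 = a.getD p 0 := by
        intro p hp
        rw [hunch p (by intro k hk; omega)]
        exact hun p (by omega)
      have hcls' : ∀ r' : Nat, r' < 3 →
          (clsL arr' r' (cntr r' (r + 3 * q + 1))).Pairwise (· ≤ ·) ∧
          (clsL arr' r' (cntr r' (r + 3 * q + 1))).Perm
            (clsL a r' (cntr r' (r + 3 * q + 1))) := by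
        intro r' hr'
        by_cases hrr : r' = r
        · subst hrr
          rw [show cntr r' (r' + 3 * q + 1) = q + 1 from by unfold cntr; omega]
          constructor
          · rw [hcls3]
            exact insS_sorted _ _ hsort
          · rw [hcls3]
            have h1 : (insS key (clsL arr r' q)).Perm (key :: clsL arr r' q) :=
              insS_perm _ _
            have h2 : (key :: clsL arr r' q).Perm (key :: clsL a r' q) := hperm.cons key
            have h3' : (key :: clsL a r' q).Perm (clsL a r' q ++ [key]) :=
              (List.perm_append_singleton key _).symm
            have h4 : clsL a r' q ++ [key] = clsL a r' (q + 1) := by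
              rw [clsL_succ, hk2]
            exact ((h1.trans h2).trans h3').trans (h4 ▸ List.Perm.refl _)
        · have hcc : cntr r' (r + 3 * q + 1) = cntr r' (r + 3 * q) := by
            unfold cntr; omega
          rw [hcc]
          have heq : clsL arr' r' (cntr r' (r + 3 * q)) = clsL arr r' (cntr r' (r + 3 * q)) := by
            refine clsL_congr ?_
            intro k hk
            exact hunch _ (by intro k' hk'; omega)
          rw [heq]
          exact hcls r' hr'
      have hrec := ihf (r + 3 * q + 1) arr' (c + (cnt : Int) + 1) (by omega) (by omega)
        (hlen3.trans hlen) hunch' hcls'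
      rw [show ((r + 3 * q : Nat) : Int) + 1 = ((r + 3 * q + 1 : Nat) : Int) from by push_cast; ring,
        hrec]
      have hSa : (cnt : Int) = (SaN a (r + 3 * q) : Int) := by
        unfold SaN
        rw [show (r + 3 * q) % 3 = r from by omega, show (r + 3 * q) / 3 = q from by omega]
        rw [hcnt, hk2, hperm.countP_eq]
      have hCf : CntF a (r + 3 * q + 1) = CntF a (r + 3 * q) + 1 + (SaN a (r + 3 * q) : Int) := by
        show CntF a ((r + 3 * q) + 1) = _
        rw [CntF, if_pos (by omega : 3 ≤ r + 3 * q)]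
      rw [hCf, hSa]
      ring

lemma CntF_of_le_three (a : List Int) (n : Nat) (hn : n ≤ 3) : CntF a n = 0 := by
  interval_cases n <;> rfl

lemma shell3_eq_CntF (a : List Int) : shell3 a = CntF a a.length := by
  unfold shell3
  simp only [PySem.List.len_eq]
  by_cases h3 : a.length ≤ 3
  · rw [PySem.List.pyRange_one_eq_nil (by omega), CntF_of_le_three a _ h3]
    rfl
  · have hbase : ∀ r : Nat, r < 3 →
        (clsL a r (cntr r 3)).Pairwise (· ≤ ·) ∧
        (clsL a r (cntr r 3)).Perm (clsL a r (cntr r 3)) := by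
      intro r hr
      rw [show cntr r 3 = 1 from by unfold cntr; omega]
      exact ⟨by simp [clsL], List.Perm.refl _⟩
    have hout := outer_loop a (a.length - 3) 3 a 0 (le_refl 3) (by omega) rfl
      (fun p _ => rfl) hbase
    rw [CntF_of_le_three a 3 (le_refl 3)] at hout
    simpa using hout

lemma alt_inner (a : List Int) (i : Nat) (h3 : 3 ≤ i) (t0 : Int) :
    (PySem.List.pyRange (PySem.Int.mod (↑i) 3) (↑i) 3).foldl
      (fun t k =>
        if PySem.List.pyGetD a (↑i) 0 < PySem.List.pyGetD a k 0 then t + 1 else t) t0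
      = t0 + (SaN a i : Int) := by
  have hmod : PySem.Int.mod (↑i) 3 = ((i % 3 : Nat) : Int) := by
    exact_mod_cast PySem.Int.mod_natCast i 3
  rw [hmod, PySem.List.pyRange_of_pos _ _ (by norm_num : (0:Int) < 3)]
  rw [show (if ((i % 3 : Nat) : Int) < (i : Int)
        then (((i : Int) - ((i % 3 : Nat) : Int) + 3 - 1) / 3).toNat else 0) = i / 3 from by
      rw [if_pos (by omega)]; omega]
  rw [List.foldl_map]
  simp only [show ∀ k : Nat, ((i % 3 : Nat) : Int) + 3 * (k : Int) = ((i % 3 + 3 * k : Nat) : Int)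
      from fun k => by push_cast; ring,
    PySem.List.pyGetD_natCast]
  rw [PySem.List.foldl_ite_add_one
      (p := fun k : Nat => a.getD i 0 < a.getD (i % 3 + 3 * k) 0)]
  congr 1
  unfold SaN clsL
  rw [List.countP_map]
  rfl

lemma alt_fold (a : List Int) : ∀ m : Nat,
    (PySem.List.pyRange 3 ((m : Nat) : Int) 1).foldl
      (fun total i =>
        (PySem.List.pyRange (PySem.Int.mod i 3) i 3).foldl
          (fun t k =>
            if PySem.List.pyGetD a i 0 < PySem.List.pyGetD a k 0 then t + 1 else t)
          (total + 1))
      0 = CntF a m := by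
  intro m
  induction m with
  | zero =>
      rw [PySem.List.pyRange_one_eq_nil (by norm_num)]
      rfl
  | succ m ih =>
      by_cases h3 : 3 ≤ m
      · rw [show ((m + 1 : Nat) : Int) = ((m : Nat) : Int) + 1 from by push_cast; ring,
          PySem.List.pyRange_one_succ_right (by omega), List.foldl_append, ih,
          List.foldl_cons, List.foldl_nil, alt_inner a m h3]
        rw [show CntF a (m + 1) = CntF a m + 1 + (SaN a m : Int) from by
              rw [CntF, if_pos h3]]
      · rw [PySem.List.pyRange_one_eq_nil (by omega),
          show CntF a (m + 1) = 0 from by rw [CntF, if_neg h3]]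
        rfl

lemma shell3_alt_eq_CntF (a : List Int) : shell3_alt a = CntF a a.length := by
  unfold shell3_alt
  simp only [PySem.List.len_eq]
  exact alt_fold a a.length

-- ===== VERDICT (by name: the statement is the Claim_ definition above) =====
theorem shell3_spec : Claim_equal_shell3 := by
  intro input_array _
  unfold Spec_shell3
  rw [shell3_eq_CntF, shell3_alt_eq_CntF]
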